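-- pv_equiv track=rewrite | github.com/vishalbelsare/holoviews | holodata/util.py | _process_underscores
-- ===== SOURCE A (Python) =====
-- import itertools
--
-- def _process_underscores(tokens):
--     "Strip underscores to make sure the number is correct after join"
--     groups = [[str(''.join(el))] if b else list(el)
--               for (b,el) in itertools.groupby(tokens, lambda k: k=='_')]
--     flattened = [el for group in groups for el in group]
--     processed = []
--     for token in flattened:
--         if token == '_':  continue
--         if token.startswith('_'):
--             token = str(token[1:])
--         if token.endswith('_'):
--             token = str(token[:-1])
--         processed.append(token)
--     return processed
-- ===== SOURCE B (Python) =====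
-- def _process_underscores(tokens):
--     "Strip underscores to make sure the number is correct after join"
--     processed = []
--     run = 0
--     for token in tokens:
--         if token == '_':
--             run += 1
--             continue
--         if run >= 2:
--             processed.append('_' * (run - 2))
--         run = 0
--         if token.startswith('_'):
--             token = token[1:]
--         if token.endswith('_'):
--             token = token[:-1]
--         processed.append(token)
--     if run >= 2:
--         processed.append('_' * (run - 2))
--     return processed
-- ===== Notes on version B (the rewrite author's own statement) =====
-- stated objective: simpler
-- what changed: Replaces the itertools.groupby pipeline (group runs, join them into a string, flatten, then a second strip pass) with one single-pass state machine keeping a counter of the current run of '_' tokens and flushing '_'*(run-2) at each run boundary.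
import Mathlib
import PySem

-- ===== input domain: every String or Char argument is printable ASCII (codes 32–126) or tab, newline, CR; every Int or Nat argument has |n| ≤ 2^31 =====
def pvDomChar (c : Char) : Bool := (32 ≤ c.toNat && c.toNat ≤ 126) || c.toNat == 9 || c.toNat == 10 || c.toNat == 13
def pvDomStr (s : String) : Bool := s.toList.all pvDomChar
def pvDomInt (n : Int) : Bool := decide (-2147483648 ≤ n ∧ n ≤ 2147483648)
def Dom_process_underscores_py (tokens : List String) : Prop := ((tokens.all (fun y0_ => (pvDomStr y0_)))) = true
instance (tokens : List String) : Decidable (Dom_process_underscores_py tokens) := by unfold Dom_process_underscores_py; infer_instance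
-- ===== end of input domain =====

-- B replaces A's groupby/join/flatten/second-pass pipeline with one single-pass loop counting
-- the current run of '_' tokens (objective: simpler — no intermediate lists, one traversal).

-- ===== PORT A =====
-- itertools.groupby(tokens, lambda k: k == '_'): maximal runs of tokens with equal key
def pvGroupBy : List String → List (Bool × List String)
  | [] => []
  | t :: ts =>
      (t == "_", t :: ts.takeWhile (fun x => (x == "_") == (t == "_"))) ::
        pvGroupBy (ts.dropWhile (fun x => (x == "_") == (t == "_")))
termination_by l => l.length
decreasing_by
  simp only [List.length_cons]
  have := List.length_dropWhile_le (fun x => (x == "_") == (t == "_")) ts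
  omega

-- the two sequential one-underscore strips of the loop body (this two-if body appears
-- verbatim in A's and in B's Python, so both ports share it)
def pvStrip (token : String) : String :=
  let token := if PySem.Str.startswith token "_" then PySem.Str.slice token (some 1) none else token
  if PySem.Str.endswith token "_" then PySem.Str.slice token none (some (-1)) else token

def process_underscores_py (tokens : List String) : List String :=
  let groups := (pvGroupBy tokens).map (fun g => if g.1 then [PySem.Str.join "" g.2] else g.2)
  let flattened := groups.flatMap id
  flattened.foldl (fun processed token =>
    if token == "_" then processed else processed ++ [pvStrip token]) []

-- ===== PORT B =====
-- '_' * n (exact: a single ASCII character repeated)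
def pvUnd (n : Nat) : String := String.ofList (List.replicate n '_')

def process_underscores_py_alt (tokens : List String) : List String :=
  let st := tokens.foldl (fun (s : List String × Nat) token =>
      if token == "_" then (s.1, s.2 + 1)
      else ((if s.2 ≥ 2 then s.1 ++ [pvUnd (s.2 - 2)] else s.1) ++ [pvStrip token], 0))
    ([], 0)
  if st.2 ≥ 2 then st.1 ++ [pvUnd (st.2 - 2)] else st.1

-- ===== PRECONDITION & SPEC =====
def Spec_process_underscores_py (tokens : List String) (out : List String) : Prop := out = process_underscores_py_alt tokens
instance (tokens : List String) (out : List String) : Decidable (Spec_process_underscores_py tokens out) := by unfold Spec_process_underscores_py; infer_instance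

-- ===== CLAIM (what is proved, stated in full; the proofs are below) =====
def Claim_equal_process_underscores_py : Prop := ∀ (tokens : List String), Dom_process_underscores_py tokens → Spec_process_underscores_py tokens (process_underscores_py tokens)

-- ===== LEMMAS AND PROOFS =====

-- what a run of r consecutive '_' tokens contributes to the output
def pvFlush (r : Nat) : List String := if r ≥ 2 then [pvUnd (r - 2)] else []

-- common specification both ports are reduced to
def pvSpec : List String → List String
  | [] => []
  | t :: ts =>
      if t == "_" then
        pvFlush (1 + (ts.takeWhile (fun x => x == "_")).length) ++
          pvSpec (ts.dropWhile (fun x => x == "_"))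
      else pvStrip t :: pvSpec ts
termination_by l => l.length
decreasing_by
  · simp only [List.length_cons]
    have := List.length_dropWhile_le (fun x => x == "_") ts
    omega
  · simp

-- ---- string facts ----
lemma pvStr_ext {a b : String} (h : a.toList = b.toList) : a = b := by
  have := congrArg String.ofList h; simpa using this

lemma pvUnd_toList (n : Nat) : (pvUnd n).toList = List.replicate n '_' := by
  simp [pvUnd]

lemma pvJoin_und (k : Nat) : PySem.Str.join "" (List.replicate k "_") = pvUnd k := by
  apply pvStr_ext
  rw [PySem.Str.toList_join, pvUnd_toList]
  have h0 : "".toList = ([] : List Char) := by decide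
  have h1 : "_".toList = ['_'] := by decide
  rw [h0, List.map_replicate, h1]
  have := PySem.Chars.join_nil_singletons (List.replicate k '_')
  simpa [List.map_replicate] using this

lemma pvUnd_beq (r : Nat) : (pvUnd (r + 2) == "_") = false := by
  rw [beq_eq_false_iff_ne]
  intro h
  have := congrArg String.toList h
  rw [pvUnd_toList] at this
  have h1 : "_".toList = ['_'] := by decide
  rw [h1] at this
  have := congrArg List.length this
  simp at this

lemma pvStrip_und (r : Nat) : pvStrip (pvUnd (r + 2)) = pvUnd r := by
  unfold pvStrip
  have h1 : "_".toList = ['_'] := by decide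
  have hsw : PySem.Str.startswith (pvUnd (r + 2)) "_" = true := by
    rw [PySem.Str.startswith_eq, pvUnd_toList, h1, PySem.Chars.startswith_iff]
    exact ⟨List.replicate (r + 1) '_', by simp [← List.replicate_succ]⟩
  rw [if_pos hsw]
  have hmid : (PySem.Str.slice (pvUnd (r + 2)) (some 1) none).toList = List.replicate (r + 1) '_' := by
    simp [PySem.Str.toList_slice, PySem.List.slice_from_one, pvUnd_toList, List.replicate_succ]
  have hew : PySem.Str.endswith (PySem.Str.slice (pvUnd (r + 2)) (some 1) none) "_" = true := by
    rw [PySem.Str.endswith_eq, hmid, h1, PySem.Chars.endswith_iff]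
    exact ⟨List.replicate r '_', by rw [← List.replicate_succ']⟩
  rw [if_pos hew]
  apply pvStr_ext
  rw [PySem.Str.toList_slice, PySem.Chars.slice_eq_listSlice, PySem.List.slice_to_neg_one, hmid,
    pvUnd_toList, List.replicate_succ', List.dropLast_concat]

lemma pvProcOne (r : Nat) (h : 1 ≤ r) :
    (if pvUnd r == "_" then ([] : List String) else [pvStrip (pvUnd r)]) = pvFlush r := by
  match r, h with
  | 1, _ => decide
  | (r + 2), _ => simp [pvUnd_beq, pvStrip_und, pvFlush]

-- ---- A reduced to pvSpec ----
def pvProc : List String → List String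
  | [] => []
  | t :: l => (if t == "_" then [] else [pvStrip t]) ++ pvProc l

lemma pvFoldl_proc (l : List String) (acc : List String) :
    l.foldl (fun processed token =>
      if token == "_" then processed else processed ++ [pvStrip token]) acc
      = acc ++ pvProc l := by
  induction l generalizing acc with
  | nil => simp [pvProc]
  | cons t l ih =>
      rw [List.foldl_cons, ih, pvProc]
      by_cases h : (t == "_") = true <;> simp [h]

def pvFlat (tokens : List String) : List String :=
  ((pvGroupBy tokens).map (fun g => if g.1 then [PySem.Str.join "" g.2] else g.2)).flatMap id

lemma pvFlat_cons_ne (t : String) (ts : List String) (h : (t == "_") = false) :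
    pvFlat (t :: ts) = t :: pvFlat ts := by
  cases ts with
  | nil => unfold pvFlat; rw [pvGroupBy]; simp [h, pvGroupBy]
  | cons h2 ts' =>
      by_cases hh : (h2 == "_") = true
      · unfold pvFlat
        rw [pvGroupBy]
        simp [h, hh]
      · unfold pvFlat
        rw [pvGroupBy, pvGroupBy]
        simp [h, hh]

lemma pvA_eq_spec (tokens : List String) : pvProc (pvFlat tokens) = pvSpec tokens := by
  induction tokens using pvSpec.induct with
  | case1 => unfold pvFlat; rw [pvGroupBy]; simp [pvSpec, pvProc]
  | case2 t ts h ih =>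
      have ht : t = "_" := by simpa using h
      have hpred : (fun x => (x == "_") == (t == "_")) = (fun x => x == "_") := by
        funext x; rw [h]; simp
      have htw : ts.takeWhile (fun x => x == "_")
          = List.replicate (ts.takeWhile (fun x => x == "_")).length "_" := by
        apply List.eq_replicate_of_mem
        intro b hb
        have := List.mem_takeWhile_imp hb
        simpa using this
      have hflat : pvFlat (t :: ts)
          = pvUnd ((ts.takeWhile (fun x => x == "_")).length + 1)
              :: pvFlat (ts.dropWhile (fun x => x == "_")) := by
        unfold pvFlat
        rw [pvGroupBy, hpred]
        simp only [h, if_true, List.map_cons, List.flatMap_cons, id]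
        rw [ht]
        conv_lhs => rw [htw]
        rw [← List.replicate_succ, pvJoin_und]
        rw [List.singleton_append]
      rw [hflat, pvSpec]
      simp only [h, if_true]
      rw [pvProc, ih, pvProcOne _ (by omega), Nat.add_comm]
  | case3 t ts h ih =>
      rw [pvFlat_cons_ne t ts (by simpa using h), pvSpec]
      simp only [h]
      rw [pvProc, ih]
      simp [h]

-- ---- B reduced to pvSpec ----
def pvBSpec : List String → Nat → List String
  | [], r => pvFlush r
  | t :: ts, r =>
      if t == "_" then pvBSpec ts (r + 1) else (pvFlush r ++ [pvStrip t]) ++ pvBSpec ts 0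

lemma pvB_fold (l : List String) (acc : List String) (r : Nat) :
    (if (l.foldl (fun (s : List String × Nat) token =>
        if token == "_" then (s.1, s.2 + 1)
        else ((if s.2 ≥ 2 then s.1 ++ [pvUnd (s.2 - 2)] else s.1) ++ [pvStrip token], 0))
        (acc, r)).2 ≥ 2
      then (l.foldl (fun (s : List String × Nat) token =>
        if token == "_" then (s.1, s.2 + 1)
        else ((if s.2 ≥ 2 then s.1 ++ [pvUnd (s.2 - 2)] else s.1) ++ [pvStrip token], 0))
        (acc, r)).1 ++ [pvUnd ((l.foldl (fun (s : List String × Nat) token =>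
        if token == "_" then (s.1, s.2 + 1)
        else ((if s.2 ≥ 2 then s.1 ++ [pvUnd (s.2 - 2)] else s.1) ++ [pvStrip token], 0))
        (acc, r)).2 - 2)]
      else (l.foldl (fun (s : List String × Nat) token =>
        if token == "_" then (s.1, s.2 + 1)
        else ((if s.2 ≥ 2 then s.1 ++ [pvUnd (s.2 - 2)] else s.1) ++ [pvStrip token], 0))
        (acc, r)).1)
      = acc ++ pvBSpec l r := by
  induction l generalizing acc r with
  | nil => rw [pvBSpec]; unfold pvFlush; split <;> simp_all
  | cons t l ih =>
      by_cases h : (t == "_") = true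
      · rw [pvBSpec]
        simp only [List.foldl_cons, h, if_true, ih]
      · rw [pvBSpec]
        simp only [List.foldl_cons]
        rw [if_neg h, if_neg h, ih]
        unfold pvFlush
        by_cases hr : r ≥ 2 <;> simp [hr]

lemma pvSpec_flush (ts : List String) :
    pvFlush ((ts.takeWhile (fun x => x == "_")).length) ++ pvSpec (ts.dropWhile (fun x => x == "_"))
      = pvSpec ts := by
  cases ts with
  | nil => simp [pvSpec, pvFlush]
  | cons h ts' =>
      by_cases hh : (h == "_") = true
      · conv_rhs => rw [pvSpec]
        simp [hh, Nat.add_comm]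
      · have hf : (h == "_") = false := by simpa using hh
        simp [hf, pvFlush]

lemma pvBSpec_eq (l : List String) (r : Nat) :
    pvBSpec l r = pvFlush (r + (l.takeWhile (fun x => x == "_")).length) ++
      pvSpec (l.dropWhile (fun x => x == "_")) := by
  induction l generalizing r with
  | nil => simp [pvBSpec, pvSpec]
  | cons t ts ih =>
      by_cases h : (t == "_") = true
      · rw [pvBSpec, if_pos h, ih (r + 1)]
        simp only [List.takeWhile_cons, List.dropWhile_cons, h, if_true, List.length_cons]
        rw [show r + 1 + (ts.takeWhile (fun x => x == "_")).length
            = r + ((ts.takeWhile (fun x => x == "_")).length + 1) from by omega]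
      · have hf : (t == "_") = false := by simpa using h
        rw [pvBSpec, if_neg h, ih 0, Nat.zero_add, pvSpec_flush]
        have hts : pvSpec (t :: ts) = pvStrip t :: pvSpec ts := by rw [pvSpec, if_neg h]
        simp [hf, hts]

-- ===== VERDICT (by name: the statement is the Claim_ definition above) =====
theorem process_underscores_py_spec : Claim_equal_process_underscores_py := by
  intro tokens _
  unfold Spec_process_underscores_py process_underscores_py process_underscores_py_alt
  simp only []
  rw [show ((pvGroupBy tokens).map (fun g => if g.1 then [PySem.Str.join "" g.2] else g.2)).flatMap id
      = pvFlat tokens from rfl]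
  rw [pvFoldl_proc, List.nil_append, pvA_eq_spec, pvB_fold, List.nil_append, pvBSpec_eq,
    Nat.zero_add, pvSpec_flush]
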